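-- pv_equiv track=rewrite | github.com/sii-research/siiRL | siirl/dag_worker/dag_utils.py | format_metrics_by_group
-- ===== SOURCE A (Python) =====
-- from typing import Dict, Optional, Type, List, Any, Tuple, Union
--
-- def format_metrics_by_group(metrics: Dict[str, Any], group_order: List[str], ) -> Dict[str, Any]:
--     """
--     A flexible helper function that formats metrics based on a predefined group order
--     and alphabetical order within groups. It supports extracting specific keys from
--     a group to be placed elsewhere in the sequence.
--     """
--     if not metrics:
--         return {}
--
--     ordered_dict = {}
--     processed_keys = set()
--
--     # Pre-identify all explicitly mentioned full keys to exclude them from group processing.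
--     explicitly_mentioned_keys = {key for key in group_order if key in metrics}
--
--     # 1. Process metrics according to the defined group/key order.
--     for pattern in group_order:
--         # First, check if the pattern is a full key that should be processed now.
--         if pattern in explicitly_mentioned_keys and pattern not in processed_keys:
--             ordered_dict[pattern] = metrics[pattern]
--             processed_keys.add(pattern)
--         else:
--             # Otherwise, treat the pattern as a group prefix.
--             group_prefix = f"{pattern}/"
--
--             # Find all keys belonging to this group, excluding any that are already processed
--             # or explicitly mentioned elsewhere in the order. Then sort them alphabetically.
--             keys_in_group = sorted(
--                 [
--                     key
--                     for key in metrics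
--                     if key.startswith(group_prefix)
--                     and key not in processed_keys
--                     and key not in explicitly_mentioned_keys
--                 ]
--             )
--
--             for key in keys_in_group:
--                 ordered_dict[key] = metrics[key]
--                 processed_keys.add(key)
--
--     # 2. Process all remaining keys that were not matched by any rule.
--     remaining_keys = sorted([key for key in metrics if key not in processed_keys])
--     if remaining_keys:
--         for key in remaining_keys:
--             ordered_dict[key] = metrics[key]
--
--     return ordered_dict
-- ===== SOURCE B (Python) =====
-- def format_metrics_by_group(metrics, group_order):
--     """Rank-then-sort re-implementation: one pass over group_order builds a
--     rank table; the result is all metric keys sorted by (rank, key)."""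
--     n = len(group_order)
--     first_explicit = {}   # explicitly mentioned key -> its first index in group_order
--     prefix_slots = []     # (index, pattern + '/') for every slot treated as a prefix group
--     for i, pat in enumerate(group_order):
--         if pat in metrics and pat not in first_explicit:
--             first_explicit[pat] = i
--         else:
--             prefix_slots.append((i, pat + "/"))
--
--     def rank(key):
--         if key in first_explicit:
--             return first_explicit[key]
--         for i, p in prefix_slots:
--             if key.startswith(p):
--                 return i
--         return n
--
--     out = {}
--     for key in sorted(metrics, key=lambda k: (rank(k), k)):
--         out[key] = metrics[key]
--     return out
-- ===== Notes on version B (the rewrite author's own statement) =====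
-- stated objective: alternative
-- what changed: Instead of A's loop over group_order with per-pattern filter+sort passes and a processed-set, B builds a rank table in one pass over group_order (first index for explicitly-mentioned keys, first alive prefix slot otherwise) and emits all metric keys in a single sort by (rank, key).
import Mathlib
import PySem

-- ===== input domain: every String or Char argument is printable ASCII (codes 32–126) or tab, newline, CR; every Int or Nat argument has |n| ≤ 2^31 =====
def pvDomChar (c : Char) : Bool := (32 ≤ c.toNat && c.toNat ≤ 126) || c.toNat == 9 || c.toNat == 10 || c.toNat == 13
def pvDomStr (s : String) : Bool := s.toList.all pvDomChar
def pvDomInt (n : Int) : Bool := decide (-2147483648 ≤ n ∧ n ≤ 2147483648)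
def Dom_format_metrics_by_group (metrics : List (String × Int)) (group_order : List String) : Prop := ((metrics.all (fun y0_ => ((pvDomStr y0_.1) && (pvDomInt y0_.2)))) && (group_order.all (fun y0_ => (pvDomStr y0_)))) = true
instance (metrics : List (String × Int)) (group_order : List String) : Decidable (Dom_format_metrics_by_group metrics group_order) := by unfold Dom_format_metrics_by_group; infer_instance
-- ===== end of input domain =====

-- B replaces the per-pattern filter+sort loop of A by a one-pass rank table and a single (rank, key) sort (objective: alternative decomposition).
-- ===== PORT A =====
def format_metrics_by_group (metrics : List (String × Int)) (group_order : List String) : List (String × Int) :=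
  let d := PySem.Dict.ofList metrics
  if d.items.isEmpty then [] else
  let explicit : PySem.Set String := PySem.Set.ofList (group_order.filter (fun k => d.contains k))
  let st := group_order.foldl (fun (st : PySem.Dict String Int × PySem.Set String) (pattern : String) =>
    if explicit.contains pattern && !(st.2.contains pattern) then
      (st.1.insert pattern (d.getD pattern 0), PySem.Set.add st.2 pattern)
    else
      let group_prefix := pattern ++ "/"
      let keys_in_group := PySem.List.sorted (d.keys.filter (fun k =>
        PySem.Str.startswith k group_prefix && !(st.2.contains k) && !(explicit.contains k))) (fun x => x)
      keys_in_group.foldl (fun st k => (st.1.insert k (d.getD k 0), PySem.Set.add st.2 k)) st)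
    (PySem.Dict.empty, PySem.Set.empty)
  let remaining := PySem.List.sorted (d.keys.filter (fun k => !(st.2.contains k))) (fun x => x)
  (remaining.foldl (fun od k => od.insert k (d.getD k 0)) st.1).items

-- ===== PORT B =====
def fmg_rankLoop (slots : List (Int × String)) (key : String) (n : Int) : Int :=
  match slots with
  | [] => n
  | (i, p) :: t => if PySem.Str.startswith key p then i else fmg_rankLoop t key n

def fmg_table (metrics : List (String × Int)) (group_order : List String) :
    PySem.Dict String Int × List (Int × String) :=
  let d := PySem.Dict.ofList metrics
  (PySem.List.enumerate group_order).foldl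
    (fun st ip =>
      if d.contains ip.2 && !(st.1.contains ip.2) then (st.1.insert ip.2 ip.1, st.2)
      else (st.1, st.2 ++ [(ip.1, ip.2 ++ "/")]))
    (PySem.Dict.empty, [])

def fmg_rank (metrics : List (String × Int)) (group_order : List String) (key : String) : Int :=
  match (fmg_table metrics group_order).1.get? key with
  | some r => r
  | none => fmg_rankLoop (fmg_table metrics group_order).2 key (group_order.length : Int)

def format_metrics_by_group_alt (metrics : List (String × Int)) (group_order : List String) : List (String × Int) :=
  let d := PySem.Dict.ofList metrics
  ((PySem.List.sorted2 d.keys (fun k => fmg_rank metrics group_order k) (fun k => k)).foldl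
      (fun od k => od.insert k (d.getD k 0)) PySem.Dict.empty).items

-- ===== PRECONDITION & SPEC =====
def Spec_format_metrics_by_group (metrics : List (String × Int)) (group_order : List String) (out : List (String × Int)) : Prop := out = format_metrics_by_group_alt metrics group_order
instance (metrics : List (String × Int)) (group_order : List String) (out : List (String × Int)) : Decidable (Spec_format_metrics_by_group metrics group_order out) := by unfold Spec_format_metrics_by_group; infer_instance

-- ===== CLAIM (what is proved, stated in full; the proofs are below) =====
def Claim_equal_format_metrics_by_group : Prop := ∀ (metrics : List (String × Int)) (group_order : List String), Dom_format_metrics_by_group metrics group_order → Spec_format_metrics_by_group metrics group_order (format_metrics_by_group metrics group_order)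

-- ===== LEMMAS AND PROOFS =====

-- Proof-only shorthands for "the metrics dict", "B's rank" and the (rank, key) orders.
def pvD (m : List (String × Int)) : PySem.Dict String Int := PySem.Dict.ofList m

def pvRk (m : List (String × Int)) (g : List String) (k : String) : Int := fmg_rank m g k

def pvLt (m : List (String × Int)) (g : List String) (a b : String) : Prop :=
  pvRk m g a < pvRk m g b ∨ (pvRk m g a = pvRk m g b ∧ a < b)

def pvLe (m : List (String × Int)) (g : List String) (a b : String) : Prop :=
  pvRk m g a < pvRk m g b ∨ (pvRk m g a = pvRk m g b ∧ a ≤ b)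

-- The body of port A's main loop, as a named function (definitionally the port's lambda).
def pvStepA (m : List (String × Int)) (g : List String) :
    PySem.Dict String Int × PySem.Set String → String → PySem.Dict String Int × PySem.Set String :=
  fun st pattern =>
    if PySem.Set.contains (PySem.Set.ofList (g.filter (fun k => (pvD m).contains k))) pattern
        && !(st.2.contains pattern) then
      (st.1.insert pattern ((pvD m).getD pattern 0), PySem.Set.add st.2 pattern)
    else
      let group_prefix := pattern ++ "/"
      let keys_in_group := PySem.List.sorted ((pvD m).keys.filter (fun k =>
        PySem.Str.startswith k group_prefix && !(st.2.contains k)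
          && !(PySem.Set.contains (PySem.Set.ofList (g.filter (fun k => (pvD m).contains k))) k))) (fun x => x)
      keys_in_group.foldl (fun st k => (st.1.insert k ((pvD m).getD k 0), PySem.Set.add st.2 k)) st

-- The body of fmg_table's loop, named.
def pvStepT (m : List (String × Int)) :
    PySem.Dict String Int × List (Int × String) → Int × String → PySem.Dict String Int × List (Int × String) :=
  fun st ip =>
    if (pvD m).contains ip.2 && !(st.1.contains ip.2) then (st.1.insert ip.2 ip.1, st.2)
    else (st.1, st.2 ++ [(ip.1, ip.2 ++ "/")])

-- Loop invariant of port A's main loop after the first j patterns.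
def pvInv (m : List (String × Int)) (g : List String) (j : Int) (LA : List String)
    (st : PySem.Dict String Int × PySem.Set String) : Prop :=
  st.1.items = LA.map (fun k => (k, (pvD m).getD k 0)) ∧
  LA.Perm ((pvD m).keys.filter (fun k => decide (pvRk m g k < j))) ∧
  (∀ k, st.2.contains k = true ↔ ((pvD m).contains k = true ∧ pvRk m g k < j)) ∧
  LA.Pairwise (pvLt m g)

-- ---------- fmg_table characterization ----------

lemma pv_table_go (m : List (String × Int)) (g : List String) :
    ∀ (gs pre : List String) (fe : PySem.Dict String Int) (pp : List (Int × String)),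
    g = pre ++ gs →
    (∀ p, fe.get? p = if (pvD m).contains p = true ∧ p ∈ pre then some ((List.idxOf p g : Nat) : Int) else none) →
    (∀ p, ((PySem.List.enumerate gs (pre.length : Int)).foldl (pvStepT m) (fe, pp)).1.get? p =
        if (pvD m).contains p = true ∧ p ∈ g then some ((List.idxOf p g : Nat) : Int) else none) ∧
    ((PySem.List.enumerate gs (pre.length : Int)).foldl (pvStepT m) (fe, pp)).2 =
      pp ++ ((PySem.List.enumerate gs (pre.length : Int)).filter
          (fun ip => !((pvD m).contains ip.2 && (((List.idxOf ip.2 g : Nat) : Int) == ip.1)))).map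
        (fun ip => (ip.1, ip.2 ++ "/")) := by
  intro gs
  induction gs with
  | nil =>
    intro pre fe pp hg hfe
    obtain rfl : g = pre := by simpa using hg
    constructor
    · intro p; simpa [PySem.List.enumerate_nil] using hfe p
    · simp [PySem.List.enumerate_nil]
  | cons x t ih =>
    intro pre fe pp hg hfe
    have hfx : fe.contains x = true ↔ ((pvD m).contains x = true ∧ x ∈ pre) := by
      rw [PySem.Dict.contains_eq_isSome_get?, hfe x]
      by_cases h : (pvD m).contains x = true ∧ x ∈ pre <;> simp [h]
    have hg' : g = (pre ++ [x]) ++ t := by rw [hg]; simp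
    have hlen' : (((pre ++ [x]).length : Nat) : Int) = (pre.length : Int) + 1 := by
      simp [List.length_append]
    rw [PySem.List.enumerate_cons, List.foldl_cons]
    by_cases hcond : ((pvD m).contains x && !(fe.contains x)) = true
    · obtain ⟨hcx, hnx⟩ : (pvD m).contains x = true ∧ fe.contains x = false := by
        simpa using hcond
      have hxpre : x ∉ pre := fun hmem => by
        rw [hfx.mpr ⟨hcx, hmem⟩] at hnx; cases hnx
      have hidx : List.idxOf x g = pre.length := by
        rw [hg, List.idxOf_append, if_neg hxpre]; simp
      have hstep : pvStepT m (fe, pp) ((pre.length : Int), x) =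
          (fe.insert x (pre.length : Int), pp) := by
        simp [pvStepT, hcx, hnx]
      rw [hstep]
      have hfe' : ∀ p, (fe.insert x (pre.length : Int)).get? p =
          if (pvD m).contains p = true ∧ p ∈ pre ++ [x]
          then some ((List.idxOf p g : Nat) : Int) else none := by
        intro p
        rw [PySem.Dict.get?_insert]
        by_cases hpx : p = x
        · subst hpx
          rw [if_pos rfl, if_pos ⟨hcx, by simp⟩, hidx]
        · rw [if_neg hpx, hfe p]
          by_cases hc : (pvD m).contains p = true ∧ p ∈ pre
          · rw [if_pos hc, if_pos ⟨hc.1, by simp [hc.2]⟩]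
          · rw [if_neg hc, if_neg ?_]
            rintro ⟨h1, h2⟩
            rcases List.mem_append.mp h2 with h | h
            · exact hc ⟨h1, h⟩
            · simp at h; exact hpx h
      obtain ⟨ih1, ih2⟩ := ih (pre ++ [x]) (fe.insert x (pre.length : Int)) pp hg' hfe'
      rw [hlen'] at ih1 ih2
      refine ⟨ih1, ?_⟩
      rw [ih2, List.filter_cons]
      have hdrop : (!((pvD m).contains x && (((List.idxOf x g : Nat) : Int) == (pre.length : Int)))) = false := by
        simp [hcx, hidx]
      rw [hdrop]
      simp
    · have himp : (pvD m).contains x = true → fe.contains x = true := by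
        intro hc
        by_contra hfe0
        have hnf : fe.contains x = false := by simpa using hfe0
        exact hcond (by simp [hc, hnf])
      have hstep : pvStepT m (fe, pp) ((pre.length : Int), x) =
          (fe, pp ++ [((pre.length : Int), x ++ "/")]) := by
        simp only [pvStepT]
        rw [if_neg hcond]
      rw [hstep]
      have hfe' : ∀ p, fe.get? p =
          if (pvD m).contains p = true ∧ p ∈ pre ++ [x]
          then some ((List.idxOf p g : Nat) : Int) else none := by
        intro p
        rw [hfe p]
        by_cases hc : (pvD m).contains p = true ∧ p ∈ pre
        · rw [if_pos hc, if_pos ⟨hc.1, by simp [hc.2]⟩]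
        · rw [if_neg hc]
          by_cases hc' : (pvD m).contains p = true ∧ p ∈ pre ++ [x]
          · exfalso
            obtain ⟨h1, h2⟩ := hc'
            rcases List.mem_append.mp h2 with h | h
            · exact hc ⟨h1, h⟩
            · simp at h
              subst h
              exact hc ⟨h1, (hfx.mp (himp h1)).2⟩
          · rw [if_neg hc']
      obtain ⟨ih1, ih2⟩ := ih (pre ++ [x]) fe (pp ++ [((pre.length : Int), x ++ "/")]) hg' hfe'
      rw [hlen'] at ih1 ih2
      refine ⟨ih1, ?_⟩
      rw [ih2, List.filter_cons]
      have hkeep : (!((pvD m).contains x && (((List.idxOf x g : Nat) : Int) == (pre.length : Int)))) = true := by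
        by_cases hcx : (pvD m).contains x = true
        · have hmem : x ∈ pre := (hfx.mp (himp hcx)).2
          have hlt : List.idxOf x g < pre.length := by
            rw [hg, List.idxOf_append, if_pos hmem]
            exact List.idxOf_lt_length_of_mem hmem
          have hne : ((List.idxOf x g : Nat) : Int) ≠ (pre.length : Int) := by
            exact_mod_cast Nat.ne_of_lt hlt
          simp [hcx, hne]
        · have hcf : (pvD m).contains x = false := by simpa using hcx
          simp [hcf]
      rw [hkeep]
      simp

lemma pv_table_spec (m : List (String × Int)) (g : List String) :
    (∀ p, (fmg_table m g).1.get? p =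
        if (pvD m).contains p = true ∧ p ∈ g then some ((List.idxOf p g : Nat) : Int) else none) ∧
    (fmg_table m g).2 =
      ((PySem.List.enumerate g 0).filter
          (fun ip => !((pvD m).contains ip.2 && (((List.idxOf ip.2 g : Nat) : Int) == ip.1)))).map
        (fun ip => (ip.1, ip.2 ++ "/")) := by
  have h := pv_table_go m g g [] PySem.Dict.empty [] (by simp)
    (by intro p; simp [PySem.Dict.get?_empty])
  have hf : fmg_table m g =
      (PySem.List.enumerate g ((([] : List String).length : Nat) : Int)).foldl (pvStepT m)
        (PySem.Dict.empty, []) := rfl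
  constructor
  · intro p; rw [hf]; simpa using h.1 p
  · rw [hf]; simpa using h.2

lemma pv_mem_pp_iff (m : List (String × Int)) (g : List String) (ip : Int × String) :
    ip ∈ (fmg_table m g).2 ↔ ∃ (k : Nat) (h : k < g.length),
      ip = ((k : Int), g[k] ++ "/") ∧ ¬((pvD m).contains g[k] = true ∧ List.idxOf g[k] g = k) := by
  rw [(pv_table_spec m g).2]
  simp only [List.mem_map, List.mem_filter, PySem.List.mem_enumerate_iff]
  constructor
  · rintro ⟨⟨i, pat⟩, ⟨⟨k, hk, heq⟩, hcond⟩, rfl⟩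
    obtain ⟨hi, hpat⟩ : i = 0 + (k : Int) ∧ pat = g[k] := by
      constructor <;> [exact congrArg Prod.fst heq; exact congrArg Prod.snd heq]
    subst hpat
    refine ⟨k, hk, by simp [hi], ?_⟩
    rintro ⟨hc, hidx⟩
    simp only [hc, Bool.true_and, Bool.not_eq_true', beq_eq_false_iff_ne, ne_eq] at hcond
    exact hcond (by rw [hidx, hi]; simp)
  · rintro ⟨k, hk, rfl, hnc⟩
    refine ⟨((k : Int), g[k]), ⟨⟨k, hk, by simp⟩, ?_⟩, rfl⟩
    by_cases hc : (pvD m).contains g[k] = true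
    · have hne : List.idxOf g[k] g ≠ k := fun h => hnc ⟨hc, h⟩
      simp only [hc, Bool.true_and, Bool.not_eq_true', beq_eq_false_iff_ne, ne_eq]
      exact_mod_cast hne
    · have hcf : (pvD m).contains g[k] = false := by simpa using hc
      simp [hcf]

lemma pv_pp_pairwise (m : List (String × Int)) (g : List String) :
    (fmg_table m g).2.Pairwise (fun a b => a.1 < b.1) := by
  rw [(pv_table_spec m g).2]
  refine List.Pairwise.map _ ?_ ((PySem.List.pairwise_lt_enumerate g 0).filter _)
  exact fun a b h => h

-- ---------- fmg_rankLoop ----------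

lemma pv_rankLoop_le (pp : List (Int × String)) (k : String) (n i : Int) (p : String)
    (hpw : pp.Pairwise (fun a b => a.1 < b.1)) (hmem : (i, p) ∈ pp)
    (hsw : PySem.Str.startswith k p = true) : fmg_rankLoop pp k n ≤ i := by
  induction pp with
  | nil => simp at hmem
  | cons jp t ih =>
    obtain ⟨j, q⟩ := jp
    rw [List.pairwise_cons] at hpw
    obtain ⟨hj, ht⟩ := hpw
    simp only [fmg_rankLoop]
    by_cases hswq : PySem.Str.startswith k q = true
    · rw [if_pos hswq]
      rcases List.mem_cons.mp hmem with h | h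
      · cases h; omega
      · exact le_of_lt (hj _ h)
    · rw [if_neg hswq]
      rcases List.mem_cons.mp hmem with h | h
      · cases h; exact absurd hsw hswq
      · exact ih ht h

lemma pv_rankLoop_cases (pp : List (Int × String)) (k : String) (n : Int) :
    fmg_rankLoop pp k n = n ∨ ∃ p, (fmg_rankLoop pp k n, p) ∈ pp ∧ PySem.Str.startswith k p = true := by
  induction pp with
  | nil => simp [fmg_rankLoop]
  | cons ip t ih =>
    obtain ⟨i, p⟩ := ip
    by_cases hsw : PySem.Str.startswith k p = true
    · have heq : fmg_rankLoop ((i, p) :: t) k n = i := by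
        simp only [fmg_rankLoop]; rw [if_pos hsw]
      exact Or.inr ⟨p, by rw [heq]; exact List.mem_cons_self, hsw⟩
    · have heq : fmg_rankLoop ((i, p) :: t) k n = fmg_rankLoop t k n := by
        simp only [fmg_rankLoop]; rw [if_neg hsw]
      rw [heq]
      rcases ih with h | ⟨q, hq, hqs⟩
      · exact Or.inl h
      · exact Or.inr ⟨q, List.mem_cons_of_mem _ hq, hqs⟩

-- ---------- rank facts ----------

lemma pv_rk_explicit (m : List (String × Int)) (g : List String) (p : String)
    (hc : (pvD m).contains p = true) (hm : p ∈ g) :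
    pvRk m g p = ((List.idxOf p g : Nat) : Int) := by
  unfold pvRk fmg_rank
  rw [(pv_table_spec m g).1, if_pos ⟨hc, hm⟩]

lemma pv_rk_nonexplicit (m : List (String × Int)) (g : List String) (k : String)
    (h : ¬((pvD m).contains k = true ∧ k ∈ g)) :
    pvRk m g k = fmg_rankLoop (fmg_table m g).2 k (g.length : Int) := by
  unfold pvRk fmg_rank
  rw [(pv_table_spec m g).1, if_neg h]

lemma pv_rk_nonneg (m : List (String × Int)) (g : List String) (k : String) : 0 ≤ pvRk m g k := by
  by_cases h : (pvD m).contains k = true ∧ k ∈ g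
  · rw [pv_rk_explicit m g k h.1 h.2]; positivity
  · rw [pv_rk_nonexplicit m g k h]
    rcases pv_rankLoop_cases (fmg_table m g).2 k (g.length : Int) with h' | ⟨p, hp, _⟩
    · rw [h']; positivity
    · obtain ⟨j, hj, heq, -⟩ := (pv_mem_pp_iff m g _).mp hp
      have : fmg_rankLoop (fmg_table m g).2 k (g.length : Int) = (j : Int) :=
        congrArg Prod.fst heq
      rw [this]; positivity

lemma pv_rk_le (m : List (String × Int)) (g : List String) (k : String) :
    pvRk m g k ≤ (g.length : Int) := by
  by_cases h : (pvD m).contains k = true ∧ k ∈ g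
  · rw [pv_rk_explicit m g k h.1 h.2]
    exact_mod_cast Nat.le_of_lt (List.idxOf_lt_length_of_mem h.2)
  · rw [pv_rk_nonexplicit m g k h]
    rcases pv_rankLoop_cases (fmg_table m g).2 k (g.length : Int) with h' | ⟨p, hp, _⟩
    · rw [h']
    · obtain ⟨j, hj, heq, -⟩ := (pv_mem_pp_iff m g _).mp hp
      have : fmg_rankLoop (fmg_table m g).2 k (g.length : Int) = (j : Int) :=
        congrArg Prod.fst heq
      rw [this]
      exact_mod_cast Nat.le_of_lt hj

-- At an explicit slot j, the keys of rank j are exactly [the pattern].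
lemma pv_slot_explicit (m : List (String × Int)) (g : List String) (j : Nat) (hj : j < g.length)
    (hc : (pvD m).contains g[j] = true) (hfi : List.idxOf g[j] g = j) (k : String)
    (hk : (pvD m).contains k = true) : (pvRk m g k = (j : Int) ↔ k = g[j]) := by
  constructor
  · intro hrk
    by_cases hkg : k ∈ g
    · have hre := pv_rk_explicit m g k hk hkg
      rw [hre] at hrk
      have hje : List.idxOf k g = j := by exact_mod_cast hrk
      subst hje
      exact (List.getElem_idxOf hj).symm
    · have hne : ¬((pvD m).contains k = true ∧ k ∈ g) := fun h => hkg h.2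
      rw [pv_rk_nonexplicit m g k hne] at hrk
      rcases pv_rankLoop_cases (fmg_table m g).2 k (g.length : Int) with h' | ⟨p, hp, _⟩
      · rw [h'] at hrk
        exfalso
        have : j = g.length := by exact_mod_cast hrk.symm
        omega
      · rw [hrk] at hp
        obtain ⟨k', hk', heq, hact⟩ := (pv_mem_pp_iff m g _).mp hp
        have hjk' : (j : Int) = (k' : Int) := congrArg Prod.fst heq
        have : j = k' := by exact_mod_cast hjk'
        subst this
        exact absurd ⟨hc, hfi⟩ hact
  · rintro rfl
    rw [pv_rk_explicit m g _ hc (List.getElem_mem hj), hfi]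

-- At a prefix slot j, the keys of rank j are exactly the unprocessed non-explicit keys with the prefix.
lemma pv_slot_prefix (m : List (String × Int)) (g : List String) (j : Nat) (hj : j < g.length)
    (hs : ¬((pvD m).contains g[j] = true ∧ List.idxOf g[j] g = j)) (k : String)
    (hk : (pvD m).contains k = true) :
    (pvRk m g k = (j : Int) ↔
      (PySem.Str.startswith k (g[j] ++ "/") = true ∧ ¬(k ∈ g) ∧ (j : Int) ≤ pvRk m g k)) := by
  constructor
  · intro hrk
    by_cases hkg : k ∈ g
    · exfalso
      have hre := pv_rk_explicit m g k hk hkg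
      rw [hre] at hrk
      have hje : List.idxOf k g = j := by exact_mod_cast hrk
      subst hje
      have hgj : g[List.idxOf k g] = k := List.getElem_idxOf hj
      rw [hgj] at hs
      exact hs ⟨hk, rfl⟩
    · have hne : ¬((pvD m).contains k = true ∧ k ∈ g) := fun h => hkg h.2
      rw [pv_rk_nonexplicit m g k hne] at hrk
      rcases pv_rankLoop_cases (fmg_table m g).2 k (g.length : Int) with h' | ⟨p, hp, hsw⟩
      · rw [h'] at hrk
        exfalso
        have : j = g.length := by exact_mod_cast hrk.symm
        omega
      · rw [hrk] at hp
        obtain ⟨k', hk', heq, hact⟩ := (pv_mem_pp_iff m g _).mp hp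
        have hjk' : j = k' := by
          have h' : (j : Int) = (k' : Int) := congrArg Prod.fst heq
          exact_mod_cast h'
        subst hjk'
        have hpeq : p = g[j] ++ "/" := congrArg Prod.snd heq
        refine ⟨hpeq ▸ hsw, hkg, ?_⟩
        rw [pv_rk_nonexplicit m g k hne, hrk]
  · rintro ⟨hsw, hkg, hge⟩
    have hne : ¬((pvD m).contains k = true ∧ k ∈ g) := fun h => hkg h.2
    rw [pv_rk_nonexplicit m g k hne] at hge ⊢
    have hmem : ((j : Int), g[j] ++ "/") ∈ (fmg_table m g).2 :=
      (pv_mem_pp_iff m g _).mpr ⟨j, hj, rfl, hs⟩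
    have hle := pv_rankLoop_le (fmg_table m g).2 k (g.length : Int) (j : Int) (g[j] ++ "/")
      (pv_pp_pairwise m g) hmem hsw
    omega

-- ---------- generic list facts ----------

lemma pv_filter_or_perm {α : Type} (xs : List α) (p q : α → Bool)
    (h : ∀ x ∈ xs, ¬(p x = true ∧ q x = true)) :
    (xs.filter (fun x => p x || q x)).Perm (xs.filter p ++ xs.filter q) := by
  induction xs with
  | nil => simp
  | cons x xs ih =>
    have hx := h x (by simp)
    have ih' := ih (fun y hy => h y (by simp [hy]))
    by_cases hp : p x = true
    · have hq : q x = false := by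
        cases hqx : q x with
        | false => rfl
        | true => exact absurd ⟨hp, hqx⟩ hx
      simpa [List.filter_cons, hp, hq] using ih'.cons x
    · simp only [Bool.not_eq_true] at hp
      by_cases hq : q x = true
      · simp only [List.filter_cons, hp, hq, Bool.false_or]
        exact List.Perm.trans (ih'.cons x) List.perm_middle.symm
      · simp only [Bool.not_eq_true] at hq
        simpa [List.filter_cons, hp, hq] using ih' 

lemma pv_filter_singleton {α : Type} [DecidableEq α] (xs : List α) (a : α) (hn : xs.Nodup)
    (hm : a ∈ xs) : xs.filter (fun x => decide (x = a)) = [a] := by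
  induction xs with
  | nil => simp at hm
  | cons x xs ih =>
    obtain ⟨hnx, hnxs⟩ := List.nodup_cons.mp hn
    rcases List.mem_cons.mp hm with rfl | hmem
    · have htail : xs.filter (fun y => decide (y = a)) = [] :=
        List.filter_eq_nil_iff.mpr (fun y hy => by
          simp only [decide_eq_true_eq]; rintro rfl; exact hnx hy)
      simp [htail]
    · have hxa : ¬ x = a := by rintro rfl; exact hnx hmem
      simpa [List.filter_cons, hxa] using ih hnxs hmem

lemma pv_pairwise_lt_of_sorted (xs : List String) (hn : xs.Nodup) :
    (PySem.List.sorted xs (fun x => x)).Pairwise (fun a b : String => a < b) := by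
  have hp := PySem.List.sorted_pairwise xs (fun x => x)
  have hnd : (PySem.List.sorted xs (fun x => x)).Nodup :=
    (PySem.List.sorted_perm xs (fun x => x) false).symm.nodup hn
  exact (hp.and hnd).imp (fun {a b} h => lt_of_le_of_ne h.1 h.2)

-- ---------- insertion sort produces a pvLe-sorted list ----------

lemma pv_insertBy_pairwise {α : Type} (before : α → α → Bool)
    (h1 : ∀ a b, before a b = true → before b a = false)
    (h2 : ∀ a b c, before a b = true → before c b = false → before c a = false)
    (x : α) (acc : List α) (hp : acc.Pairwise (fun a b => before b a = false)) :
    (PySem.List.insertBy before x acc).Pairwise (fun a b => before b a = false) := by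
  induction acc with
  | nil => simp [PySem.List.insertBy]
  | cons y ys ih =>
    rw [List.pairwise_cons] at hp
    obtain ⟨hy, hys⟩ := hp
    by_cases hxy : before x y = true
    · have heq : PySem.List.insertBy before x (y :: ys) = x :: y :: ys := by
        simp only [PySem.List.insertBy]; rw [if_pos hxy]
      rw [heq, List.pairwise_cons]
      refine ⟨?_, List.pairwise_cons.mpr ⟨hy, hys⟩⟩
      intro z hz
      rcases List.mem_cons.mp hz with rfl | hz
      · exact h1 x z hxy
      · exact h2 x y z hxy (hy z hz)
    · have heq : PySem.List.insertBy before x (y :: ys) = y :: PySem.List.insertBy before x ys := by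
        simp only [PySem.List.insertBy]; rw [if_neg hxy]
      rw [heq, List.pairwise_cons]
      refine ⟨?_, ih hys⟩
      intro z hz
      rcases (PySem.List.insertBy_mem_iff before x z ys).mp hz with rfl | hz
      · exact Bool.not_eq_true _ ▸ (by simpa using hxy)
      · exact hy z hz

lemma pv_foldl_insertBy_pairwise {α : Type} (before : α → α → Bool)
    (h1 : ∀ a b, before a b = true → before b a = false)
    (h2 : ∀ a b c, before a b = true → before c b = false → before c a = false)
    (xs acc : List α) (hp : acc.Pairwise (fun a b => before b a = false)) :
    (xs.foldl (fun acc x => PySem.List.insertBy before x acc) acc).Pairwise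
      (fun a b => before b a = false) := by
  induction xs generalizing acc with
  | nil => simpa using hp
  | cons x xs ih => exact ih _ (pv_insertBy_pairwise before h1 h2 x acc hp)

-- The comparison sorted2 uses for key (rank, key), plus its Prop characterizations.
def pvBf (rk : String → Int) (a b : String) : Bool :=
  decide (rk a < rk b) || (!decide (rk b < rk a) && decide (a < b))

lemma pvBf_true_iff (rk : String → Int) (a b : String) :
    (pvBf rk a b = true) ↔ (rk a < rk b ∨ (¬ rk b < rk a ∧ a < b)) := by
  simp only [pvBf, Bool.or_eq_true, Bool.and_eq_true, Bool.not_eq_true', decide_eq_true_eq,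
    decide_eq_false_iff_not]

lemma pvBf_false_iff (rk : String → Int) (a b : String) :
    (pvBf rk a b = false) ↔ (¬ rk a < rk b ∧ (rk b < rk a ∨ ¬ a < b)) := by
  simp only [pvBf, Bool.or_eq_false_iff, Bool.and_eq_false_iff,
    decide_eq_false_iff_not, decide_eq_true_eq, Bool.not_eq_eq_eq_not, Bool.not_false]

lemma pv_sorted2_pairwise (m : List (String × Int)) (g : List String) (xs : List String) :
    (PySem.List.sorted2 xs (fun k => fmg_rank m g k) (fun k => k)).Pairwise (pvLe m g) := by
  have hmain := pv_foldl_insertBy_pairwise (pvBf (fun k => fmg_rank m g k))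
    (by
      intro a b h
      rw [pvBf_true_iff] at h
      rw [← Bool.not_eq_true, pvBf_true_iff]
      rcases h with h | ⟨h1, h2⟩
      · intro hc; rcases hc with hc | ⟨hc1, _⟩ <;> omega
      · rintro (hc | ⟨_, hc2⟩)
        · omega
        · exact lt_asymm h2 hc2)
    (by
      intro a b c hab hcb
      rw [pvBf_true_iff] at hab
      rw [← Bool.not_eq_true, pvBf_true_iff] at hcb ⊢
      rintro (hca | ⟨hca1, hca2⟩)
      · rcases hab with h | ⟨h1, _⟩ <;>
          exact hcb (Or.inl (by omega))
      · rcases hab with h | ⟨h1, h2⟩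
        · exact hcb (Or.inl (by omega))
        · refine hcb ?_
          by_cases hbc : fmg_rank m g c < fmg_rank m g b
          · exact Or.inl hbc
          · exact Or.inr ⟨by omega, lt_trans hca2 h2⟩)
    xs [] List.Pairwise.nil
  refine List.Pairwise.imp ?_ hmain
  intro a b h
  rw [pvBf_false_iff] at h
  obtain ⟨h1, h2⟩ := h
  unfold pvLe pvRk
  by_cases hr : fmg_rank m g a < fmg_rank m g b
  · exact Or.inl hr
  · refine Or.inr ⟨?_, ?_⟩
    · omega
    · rcases h2 with h2 | h2
      · omega
      · exact le_of_not_gt h2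

-- ---------- port A's main loop ----------

lemma pv_main_go (m : List (String × Int)) (g : List String) :
    ∀ (gs pre : List String) (st : PySem.Dict String Int × PySem.Set String) (LA : List String),
    g = pre ++ gs → pvInv m g (pre.length : Int) LA st →
    ∃ LA', pvInv m g ((pre.length + gs.length : Nat) : Int) LA' (gs.foldl (pvStepA m g) st) := by
  intro gs
  induction gs with
  | nil =>
    intro pre st LA hg hinv
    exact ⟨LA, by simpa using hinv⟩
  | cons x t ih =>
    intro pre st LA hg hinv
    obtain ⟨hitems, hperm, hproc, hpw⟩ := hinv
    have hsc : ∀ (s : PySem.Set String) (k : String), s.contains k = true ↔ k ∈ s := by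
      intro s k; simp [PySem.Set.contains]
    have hE : ∀ p : String,
        PySem.Set.contains (PySem.Set.ofList (g.filter (fun k => (pvD m).contains k))) p = true ↔
          (p ∈ g ∧ (pvD m).contains p = true) := by
      intro p
      rw [hsc, PySem.Set.mem_ofList, List.mem_filter]
    have hjlt : pre.length < g.length := by rw [hg]; simp
    have hgj : g[pre.length]'hjlt = x := by
      rw [List.getElem_of_eq hg, List.getElem_append_right (Nat.le_refl _)]
      simp
    have hxg : x ∈ g := by rw [hg]; simp
    have hnodK : (pvD m).keys.Nodup := PySem.Dict.nodup_keys_ofList m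
    have hkeys1 : st.1.keys = LA := by
      simp only [PySem.Dict.keys]; rw [hitems]; simp [Function.comp_def]
    have hLAr : ∀ a ∈ LA, pvRk m g a < (pre.length : Int) := by
      intro a ha
      have := hperm.mem_iff.mp ha
      simp only [List.mem_filter, decide_eq_true_eq] at this
      exact this.2
    have hlen : (((pre ++ [x]).length : Nat) : Int) = (pre.length : Int) + 1 := by simp
    have hg' : g = (pre ++ [x]) ++ t := by rw [hg]; simp
    have hlenstep : pre.length + (x :: t).length = (pre ++ [x]).length + t.length := by
      simp only [List.length_cons, List.length_append, List.length_nil]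
      omega
    rw [List.foldl_cons, hlenstep]
    by_cases hcond : (PySem.Set.contains
        (PySem.Set.ofList (g.filter (fun k => (pvD m).contains k))) x && !(st.2.contains x)) = true
    · -- explicit slot: the pattern itself is emitted
      rw [Bool.and_eq_true] at hcond
      obtain ⟨hEx, hns'⟩ := hcond
      have hns : st.2.contains x = false := by simpa using hns'
      obtain ⟨-, hcx2⟩ := (hE x).mp hEx
      have hge : (pre.length : Int) ≤ pvRk m g x := by
        by_contra h
        push_neg at h
        rw [(hproc x).mpr ⟨hcx2, h⟩] at hns
        cases hns
      have hrke := pv_rk_explicit m g x hcx2 hxg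
      have hile : List.idxOf x g ≤ pre.length := by
        rw [hg, List.idxOf_append]
        split_ifs with h
        · exact le_of_lt (List.idxOf_lt_length_of_mem h)
        · simp
      have hfi : List.idxOf x g = pre.length := by
        rw [hrke] at hge
        have : pre.length ≤ List.idxOf x g := by exact_mod_cast hge
        omega
      have hrkx : pvRk m g x = (pre.length : Int) := by rw [hrke, hfi]
      have huniq : ∀ k', (pvD m).contains k' = true →
          (pvRk m g k' = (pre.length : Int) ↔ k' = x) := by
        intro k' hk'
        have h := pv_slot_explicit m g pre.length hjlt (by rw [hgj]; exact hcx2)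
          (by rw [hgj]; exact hfi) k' hk'
        rwa [hgj] at h
      have hstep : pvStepA m g st x =
          (st.1.insert x ((pvD m).getD x 0), PySem.Set.add st.2 x) := by
        unfold pvStepA
        rw [if_pos (by rw [Bool.and_eq_true]; exact ⟨hEx, hns'⟩)]
      rw [hstep]
      have hxK : x ∈ (pvD m).keys := (PySem.Dict.contains_iff_mem_keys (pvD m) x).mp hcx2
      have hxLA : x ∉ LA := by
        intro h
        have := hperm.mem_iff.mp h
        simp only [List.mem_filter, decide_eq_true_eq] at this
        omega
      have hnc1 : st.1.contains x = false := by
        cases hcc : st.1.contains x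
        · rfl
        · exact absurd (hkeys1 ▸ (PySem.Dict.contains_iff_mem_keys st.1 x).mp hcc) hxLA
      have hfil : (pvD m).keys.filter (fun k => decide (pvRk m g k = (pre.length : Int))) = [x] := by
        rw [List.filter_congr (fun k hk => decide_eq_decide.mpr
          (huniq k ((PySem.Dict.contains_iff_mem_keys (pvD m) k).mpr hk)))]
        exact pv_filter_singleton (pvD m).keys x hnodK hxK
      refine (ih (pre ++ [x]) _ (LA ++ [x]) hg' ?_).imp (fun LA' h => h)
      rw [hlen]
      refine ⟨?_, ?_, ?_, ?_⟩
      · rw [PySem.Dict.items_insert_of_not_contains st.1 _ hnc1, hitems]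
        simp
      · have hsplit := pv_filter_or_perm (pvD m).keys
          (fun k => decide (pvRk m g k < (pre.length : Int)))
          (fun k => decide (pvRk m g k = (pre.length : Int)))
          (by intro k _; simp only [decide_eq_true_eq]; omega)
        have hc1 : (pvD m).keys.filter (fun k => decide (pvRk m g k < (pre.length : Int) + 1)) =
            (pvD m).keys.filter (fun k => (decide (pvRk m g k < (pre.length : Int)) ||
              decide (pvRk m g k = (pre.length : Int)))) := by
          refine List.filter_congr (fun k _ => ?_)
          rw [Bool.eq_iff_iff]
          simp only [Bool.or_eq_true, decide_eq_true_eq]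
          omega
        rw [hc1]
        refine (List.Perm.append hperm ?_).trans hsplit.symm
        rw [hfil]
      · intro k
        rw [hsc, PySem.Set.mem_add, ← hsc st.2 k, ]
        constructor
        · rintro (h | rfl)
          · have := (hproc k).mp h
            exact ⟨this.1, by omega⟩
          · exact ⟨hcx2, by omega⟩
        · rintro ⟨hck, hlt⟩
          by_cases h : pvRk m g k < (pre.length : Int)
          · exact Or.inl ((hproc k).mpr ⟨hck, h⟩)
          · right
            exact (huniq k hck).mp (by omega)
      · rw [List.pairwise_append]
        refine ⟨hpw, List.pairwise_singleton _ _, ?_⟩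
        intro a ha b hb
        simp only [List.mem_singleton] at hb
        subst hb
        exact Or.inl (by rw [hrkx]; exact hLAr a ha)
    · -- prefix slot: the alphabetically sorted group block is emitted
      have hor : ((pvD m).contains x = false ∨ st.2.contains x = true) := by
        by_contra h
        push_neg at h
        obtain ⟨h1, h2⟩ := h
        have h1' : (pvD m).contains x = true := by
          cases hcc : (pvD m).contains x
          · exact absurd hcc h1
          · rfl
        have h2' : st.2.contains x = false := by
          cases hcc : st.2.contains x
          · rfl
          · exact absurd hcc h2
        exact hcond (by rw [Bool.and_eq_true]; exact ⟨(hE x).mpr ⟨hxg, h1'⟩, by rw [h2']; rfl⟩)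
      have hs : ¬((pvD m).contains (g[pre.length]'hjlt) = true ∧
          List.idxOf (g[pre.length]'hjlt) g = pre.length) := by
        rw [hgj]
        rintro ⟨hc', hfi'⟩
        rcases hor with h | h
        · rw [hc'] at h; cases h
        · have := (hproc x).mp h
          have hrke := pv_rk_explicit m g x hc' hxg
          rw [hrke, hfi'] at this
          omega
      have hiff : ∀ k, (pvD m).contains k = true →
          (pvRk m g k = (pre.length : Int) ↔
            (PySem.Str.startswith k (x ++ "/") = true ∧ ¬(k ∈ g) ∧
              (pre.length : Int) ≤ pvRk m g k)) := by
        intro k hk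
        have h := pv_slot_prefix m g pre.length hjlt hs k hk
        rwa [hgj] at h
      have hBeq : (pvD m).keys.filter (fun k =>
            PySem.Str.startswith k (x ++ "/") && !(st.2.contains k) &&
              !(PySem.Set.contains (PySem.Set.ofList (g.filter (fun k => (pvD m).contains k))) k)) =
          (pvD m).keys.filter (fun k => decide (pvRk m g k = (pre.length : Int))) := by
        refine List.filter_congr (fun k hk => ?_)
        have hck : (pvD m).contains k = true := (PySem.Dict.contains_iff_mem_keys (pvD m) k).mpr hk
        rw [Bool.eq_iff_iff]
        simp only [Bool.and_eq_true, Bool.not_eq_true', decide_eq_true_eq]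
        constructor
        · rintro ⟨⟨hsw, hpc⟩, hec⟩
          refine (hiff k hck).mpr ⟨hsw, ?_, ?_⟩
          · intro hkg
            rw [(hE k).mpr ⟨hkg, hck⟩] at hec
            cases hec
          · by_contra hlt
            push_neg at hlt
            rw [(hproc k).mpr ⟨hck, hlt⟩] at hpc
            cases hpc
        · intro h
          obtain ⟨hsw, hkg, hge⟩ := (hiff k hck).mp h
          refine ⟨⟨hsw, ?_⟩, ?_⟩
          · cases hcc : st.2.contains k
            · rfl
            · have := (hproc k).mp hcc
              omega
          · cases hcc : PySem.Set.contains
                (PySem.Set.ofList (g.filter (fun k => (pvD m).contains k))) k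
            · rfl
            · exact absurd ((hE k).mp hcc).1 hkg
      have hstep : pvStepA m g st x =
          (PySem.List.sorted ((pvD m).keys.filter (fun k =>
            PySem.Str.startswith k (x ++ "/") && !(st.2.contains k) &&
              !(PySem.Set.contains (PySem.Set.ofList (g.filter (fun k => (pvD m).contains k))) k)))
            (fun x => x)).foldl
            (fun st k => (st.1.insert k ((pvD m).getD k 0), PySem.Set.add st.2 k)) st := by
        unfold pvStepA
        rw [if_neg hcond]
      rw [hstep, hBeq]
      set Bj := PySem.List.sorted ((pvD m).keys.filter
        (fun k => decide (pvRk m g k = (pre.length : Int)))) (fun x => x) with hBj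
      have hBperm : Bj.Perm ((pvD m).keys.filter
          (fun k => decide (pvRk m g k = (pre.length : Int)))) :=
        PySem.List.sorted_perm _ _ _
      have hBrk : ∀ b ∈ Bj, pvRk m g b = (pre.length : Int) := by
        intro b hb
        have := hBperm.mem_iff.mp hb
        simp only [List.mem_filter, decide_eq_true_eq] at this
        exact this.2
      have hBsub : ∀ b ∈ Bj, b ∈ (pvD m).keys := by
        intro b hb
        have := hBperm.mem_iff.mp hb
        exact (List.mem_filter.mp this).1
      have hBnod : Bj.Nodup := hBperm.symm.nodup (hnodK.filter _)
      have hBnotLA : ∀ b ∈ Bj, b ∉ LA := by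
        intro b hb hbLA
        have := hLAr b hbLA
        have := hBrk b hb
        omega
      rw [PySem.List.foldl_prod_mk (fun d k => d.insert k ((pvD m).getD k 0))
        (fun s k => PySem.Set.add s k) Bj st.1 st.2]
      refine (ih (pre ++ [x]) _ (LA ++ Bj) hg' ?_).imp (fun LA' h => h)
      rw [hlen]
      refine ⟨?_, ?_, ?_, ?_⟩
      · rw [PySem.Dict.items_foldl_insert_fresh Bj (fun a => a) (fun a => (pvD m).getD a 0) st.1
          ?_ ?_, hitems]
        · simp
        · intro b hb
          cases hcc : st.1.contains b
          · rfl
          · exact absurd (hkeys1 ▸ (PySem.Dict.contains_iff_mem_keys st.1 b).mp hcc)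
              (hBnotLA b hb)
        · simpa using hBnod
      · have hsplit := pv_filter_or_perm (pvD m).keys
          (fun k => decide (pvRk m g k < (pre.length : Int)))
          (fun k => decide (pvRk m g k = (pre.length : Int)))
          (by intro k _; simp only [decide_eq_true_eq]; omega)
        have hc1 : (pvD m).keys.filter (fun k => decide (pvRk m g k < (pre.length : Int) + 1)) =
            (pvD m).keys.filter (fun k => (decide (pvRk m g k < (pre.length : Int)) ||
              decide (pvRk m g k = (pre.length : Int)))) := by
          refine List.filter_congr (fun k _ => ?_)
          rw [Bool.eq_iff_iff]
          simp only [Bool.or_eq_true, decide_eq_true_eq]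
          omega
        rw [hc1]
        exact (List.Perm.append hperm hBperm).trans hsplit.symm
      · intro k
        have hupd : (Bj.foldl (fun s k => PySem.Set.add s k) st.2) = PySem.Set.update st.2 Bj := rfl
        rw [hupd, hsc, PySem.Set.mem_update, ← hsc st.2 k]
        constructor
        · rintro (h | hB)
          · have := (hproc k).mp h
            exact ⟨this.1, by omega⟩
          · refine ⟨(PySem.Dict.contains_iff_mem_keys (pvD m) k).mpr (hBsub k hB), ?_⟩
            have := hBrk k hB
            omega
        · rintro ⟨hck, hlt⟩
          by_cases h : pvRk m g k < (pre.length : Int)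
          · exact Or.inl ((hproc k).mpr ⟨hck, h⟩)
          · right
            have hrkk : pvRk m g k = (pre.length : Int) := by omega
            rw [hBj]
            rw [PySem.List.mem_sorted]
            exact List.mem_filter.mpr ⟨(PySem.Dict.contains_iff_mem_keys (pvD m) k).mp hck,
              by simp [hrkk]⟩
      · rw [List.pairwise_append]
        refine ⟨hpw, ?_, ?_⟩
        · have hlt := pv_pairwise_lt_of_sorted ((pvD m).keys.filter
            (fun k => decide (pvRk m g k = (pre.length : Int)))) (hnodK.filter _)
          rw [← hBj] at hlt
          refine List.Pairwise.imp_of_mem ?_ hlt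
          intro a b ha hb hab
          exact Or.inr ⟨by rw [hBrk a ha, hBrk b hb], hab⟩
        · intro a ha b hb
          exact Or.inl (by rw [hBrk b hb]; exact hLAr a ha)

-- ---------- assembling both sides ----------

lemma pv_A_items (m : List (String × Int)) (g : List String) :
    ∃ LA : List String, format_metrics_by_group m g = LA.map (fun k => (k, (pvD m).getD k 0)) ∧
      LA.Perm (pvD m).keys ∧ LA.Pairwise (pvLt m g) := by
  have hnodK : (pvD m).keys.Nodup := PySem.Dict.nodup_keys_ofList m
  have hA : format_metrics_by_group m g =
      (if (pvD m).items.isEmpty then ([] : List (String × Int)) else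
        ((PySem.List.sorted ((pvD m).keys.filter (fun k =>
            !((g.foldl (pvStepA m g) (PySem.Dict.empty, PySem.Set.empty)).2.contains k)))
          (fun x => x)).foldl
          (fun od k => od.insert k ((pvD m).getD k 0))
          (g.foldl (pvStepA m g) (PySem.Dict.empty, PySem.Set.empty)).1).items) := rfl
  by_cases hemp : (pvD m).items.isEmpty = true
  · have hkeys : (pvD m).keys = [] := by
      simp only [PySem.Dict.keys]
      rw [List.isEmpty_iff.mp hemp]
      rfl
    refine ⟨[], ?_, ?_, List.Pairwise.nil⟩
    · rw [hA, if_pos hemp]; rfl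
    · rw [hkeys]
  · have hinit : pvInv m g ((([] : List String).length : Nat) : Int) []
        (PySem.Dict.empty, PySem.Set.empty) := by
      refine ⟨rfl, ?_, ?_, List.Pairwise.nil⟩
      · have hnil : (pvD m).keys.filter
            (fun k => decide (pvRk m g k < ((([] : List String).length : Nat) : Int))) = [] := by
          refine List.filter_eq_nil_iff.mpr (fun k _ => ?_)
          simp only [List.length_nil, Nat.cast_zero, decide_eq_true_eq]
          have := pv_rk_nonneg m g k
          omega
        rw [hnil]
      · intro k
        constructor
        · intro h
          cases (by simpa [PySem.Set.empty, PySem.Set.contains] using h : False)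
        · rintro ⟨-, hlt⟩
          have := pv_rk_nonneg m g k
          simp only [List.length_nil, Nat.cast_zero] at hlt
          omega
    obtain ⟨LA, hinv⟩ := pv_main_go m g g [] (PySem.Dict.empty, PySem.Set.empty) []
      (by simp) hinit
    simp only [List.length_nil, Nat.zero_add] at hinv
    obtain ⟨hitems, hperm, hproc, hpw⟩ := hinv
    have hLAr : ∀ a ∈ LA, pvRk m g a < (g.length : Int) := by
      intro a ha
      have := hperm.mem_iff.mp ha
      simp only [List.mem_filter, decide_eq_true_eq] at this
      exact this.2
    have hcong : (pvD m).keys.filter (fun k =>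
          !((g.foldl (pvStepA m g) (PySem.Dict.empty, PySem.Set.empty)).2.contains k)) =
        (pvD m).keys.filter (fun k => decide (pvRk m g k = (g.length : Int))) := by
      refine List.filter_congr (fun k hk => ?_)
      have hck : (pvD m).contains k = true := (PySem.Dict.contains_iff_mem_keys (pvD m) k).mpr hk
      rw [Bool.eq_iff_iff]
      simp only [Bool.not_eq_true', decide_eq_true_eq]
      constructor
      · intro h0
        have hle := pv_rk_le m g k
        have hnlt : ¬ pvRk m g k < (g.length : Int) := by
          intro hlt
          rw [(hproc k).mpr ⟨hck, hlt⟩] at h0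
          cases h0
        omega
      · intro heq
        cases hcc : (g.foldl (pvStepA m g) (PySem.Dict.empty, PySem.Set.empty)).2.contains k
        · rfl
        · have := (hproc k).mp hcc
          omega
    set Bn := PySem.List.sorted ((pvD m).keys.filter
      (fun k => decide (pvRk m g k = (g.length : Int)))) (fun x => x) with hBn
    have hBperm : Bn.Perm ((pvD m).keys.filter
        (fun k => decide (pvRk m g k = (g.length : Int)))) :=
      PySem.List.sorted_perm _ _ _
    have hBrk : ∀ b ∈ Bn, pvRk m g b = (g.length : Int) := by
      intro b hb
      have := hBperm.mem_iff.mp hb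
      simp only [List.mem_filter, decide_eq_true_eq] at this
      exact this.2
    have hBnod : Bn.Nodup := hBperm.symm.nodup (hnodK.filter _)
    have hBnotLA : ∀ b ∈ Bn, b ∉ LA := by
      intro b hb hbLA
      have := hLAr b hbLA
      have := hBrk b hb
      omega
    have hkeys1 : (g.foldl (pvStepA m g) (PySem.Dict.empty, PySem.Set.empty)).1.keys = LA := by
      simp only [PySem.Dict.keys]; rw [hitems]; simp [Function.comp_def]
    refine ⟨LA ++ Bn, ?_, ?_, ?_⟩
    · rw [hA, if_neg (by simp [hemp]), hcong, ← hBn]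
      rw [PySem.Dict.items_foldl_insert_fresh Bn (fun a => a) (fun a => (pvD m).getD a 0) _
        ?_ ?_, hitems]
      · simp
      · intro b hb
        cases hcc : (g.foldl (pvStepA m g) (PySem.Dict.empty, PySem.Set.empty)).1.contains b
        · rfl
        · exact absurd (hkeys1 ▸ (PySem.Dict.contains_iff_mem_keys _ b).mp hcc) (hBnotLA b hb)
      · simpa using hBnod
    · have hsplit := pv_filter_or_perm (pvD m).keys
        (fun k => decide (pvRk m g k < (g.length : Int)))
        (fun k => decide (pvRk m g k = (g.length : Int)))
        (by intro k _; simp only [decide_eq_true_eq]; omega)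
      have hall : (pvD m).keys.filter (fun k => (decide (pvRk m g k < (g.length : Int)) ||
          decide (pvRk m g k = (g.length : Int)))) = (pvD m).keys := by
        refine List.filter_eq_self.mpr (fun k _ => ?_)
        simp only [Bool.or_eq_true, decide_eq_true_eq]
        have := pv_rk_le m g k
        omega
      have hallp : ((pvD m).keys.filter (fun k => (decide (pvRk m g k < (g.length : Int)) ||
          decide (pvRk m g k = (g.length : Int))))).Perm (pvD m).keys := by rw [hall]
      exact (hperm.append hBperm).trans (hsplit.symm.trans hallp)
    · rw [List.pairwise_append]
      refine ⟨hpw, ?_, ?_⟩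
      · have hlt := pv_pairwise_lt_of_sorted ((pvD m).keys.filter
          (fun k => decide (pvRk m g k = (g.length : Int)))) (hnodK.filter _)
        rw [← hBn] at hlt
        refine List.Pairwise.imp_of_mem ?_ hlt
        intro a b ha hb hab
        exact Or.inr ⟨by rw [hBrk a ha, hBrk b hb], hab⟩
      · intro a ha b hb
        exact Or.inl (by rw [hBrk b hb]; exact hLAr a ha)

lemma pv_B_items (m : List (String × Int)) (g : List String) :
    ∃ LB : List String, format_metrics_by_group_alt m g = LB.map (fun k => (k, (pvD m).getD k 0)) ∧
      LB.Perm (pvD m).keys ∧ LB.Pairwise (pvLe m g) := by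
  have hnodK : (pvD m).keys.Nodup := PySem.Dict.nodup_keys_ofList m
  set LB := PySem.List.sorted2 (pvD m).keys (fun k => fmg_rank m g k) (fun k => k) with hLB
  have hperm : LB.Perm (pvD m).keys := PySem.List.sorted2_perm _ _ _ _
  have hnod : LB.Nodup := hperm.symm.nodup hnodK
  have h := PySem.Dict.items_foldl_insert_fresh LB (fun a => a) (fun a => (pvD m).getD a 0)
    PySem.Dict.empty (fun a _ => PySem.Dict.contains_empty _) (by simpa using hnod)
  refine ⟨LB, ?_, hperm, pv_sorted2_pairwise m g (pvD m).keys⟩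
  have halt : format_metrics_by_group_alt m g =
      (LB.foldl (fun od k => od.insert k ((pvD m).getD k 0)) PySem.Dict.empty).items := rfl
  rw [halt, h]
  simp [PySem.Dict.empty]


-- ===== VERDICT (by name: the statement is the Claim_ definition above) =====
theorem format_metrics_by_group_spec : Claim_equal_format_metrics_by_group := by
  intro metrics group_order _
  unfold Spec_format_metrics_by_group
  obtain ⟨LA, hA, hAperm, hAlt⟩ := pv_A_items metrics group_order
  obtain ⟨LB, hB, hBperm, hBle⟩ := pv_B_items metrics group_order
  have hLL : LA = LB := by
    refine List.Perm.eq_of_pairwise ?_ (hAlt.imp ?_) hBle (hAperm.trans hBperm.symm)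
    · intro a b _ _ hab hba
      rcases hab with h | ⟨h1, h2⟩ <;> rcases hba with h' | ⟨h1', h2'⟩ <;>
        first | omega | exact le_antisymm h2 h2'
    · intro a b h
      rcases h with h | ⟨h1, h2⟩
      · exact Or.inl h
      · exact Or.inr ⟨h1, le_of_lt h2⟩
  rw [hA, hB, hLL]
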